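-- pv_equiv track=rewrite | github.com/dwen3232/N-Wordle | utils.py | is_guess_valid
-- ===== SOURCE A (Python) =====
-- from collections import Counter
--
-- def is_guess_valid(answer, query, guess_code):
--     counter = Counter(answer)
--     for q, w in zip(query, answer):
--         r = guess_code % 3
--         if r == 0 and q in answer:
--             return False
--         elif r == 1 and (q == w or (q in counter and counter[q] == 0)):
--             return False
--         elif r == 2 and q != w:
--             return False
--         # decrement counter
--         if q in counter:
--             counter[q] -= 1
--     return True
-- ===== SOURCE B (Python) =====
-- from collections import Counter
--
-- def is_guess_valid(answer, query, guess_code):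
--     r = guess_code % 3
--     n = min(len(answer), len(query))
--     qn = query[:n]
--     if r == 0:
--         return not any(q in answer for q in qn)
--     if r == 2:
--         return qn == answer[:n]
--     # r == 1: positional inequality plus a whole-multiset bound:
--     # the guess prefix may not use any answer letter more times than the answer holds it
--     ca = Counter(answer)
--     cq = Counter(qn)
--     return all(q != w for q, w in zip(qn, answer)) and all(cq[c] <= ca[c] for c in ca)
-- ===== Notes on version B (the rewrite author's own statement) =====
-- stated objective: alternative
-- what changed: B dispatches once on guess_code % 3 into three stateless passes instead of A's single per-position loop that mutates a Counter; in particular the r==1 mode is decided by a positional-inequality scan plus a whole-multiset comparison of Counter(query prefix) against Counter(answer), replacing A's step-by-step counter decrement and zero test.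
import Mathlib
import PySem

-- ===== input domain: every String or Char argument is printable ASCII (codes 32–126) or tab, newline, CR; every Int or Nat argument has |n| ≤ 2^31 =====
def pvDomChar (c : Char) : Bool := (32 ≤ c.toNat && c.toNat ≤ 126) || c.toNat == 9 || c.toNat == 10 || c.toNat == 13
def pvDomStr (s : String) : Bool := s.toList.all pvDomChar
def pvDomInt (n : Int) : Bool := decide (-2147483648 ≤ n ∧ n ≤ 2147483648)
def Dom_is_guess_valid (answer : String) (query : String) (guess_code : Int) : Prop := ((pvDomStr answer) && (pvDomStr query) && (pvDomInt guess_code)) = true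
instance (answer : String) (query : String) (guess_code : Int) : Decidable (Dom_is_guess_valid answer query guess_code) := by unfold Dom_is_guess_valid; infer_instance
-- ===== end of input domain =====

-- B replaces A's uniform per-position loop with a stateful Counter by a dispatch on guess_code % 3
-- into three stateless passes; for the contains-mode (r == 1) the per-position counter simulation
-- becomes a positional-inequality scan plus a whole-multiset count comparison (Counter vs Counter).

-- ===== PORT A =====
-- 'q in answer' / 'q in counter' on a single char are char membership; Counter(answer) is PySem.Dict.counter;
-- 'counter[q] -= 1' under the 'q in counter' guard is Dict.modify q 0 (· - 1).
def isGuessValidLoopA (answer : List Char) (guess_code : Int) :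
    List (Char × Char) → PySem.Dict Char Int → Bool
  | [], _ => true
  | (q, w) :: rest, counter =>
    let r := PySem.Int.mod guess_code 3
    if r == 0 && answer.contains q then false
    else if r == 1 && (q == w || (counter.contains q && counter.getD q 0 == 0)) then false
    else if r == 2 && !(q == w) then false
    else
      isGuessValidLoopA answer guess_code rest
        (if counter.contains q then counter.modify q 0 (· - 1) else counter)

def is_guess_valid (answer : String) (query : String) (guess_code : Int) : Bool :=
  isGuessValidLoopA answer.toList guess_code (query.toList.zip answer.toList)
    (PySem.Dict.counter answer.toList)

-- ===== PORT B =====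
-- 'Counter(s)' is PySem.Dict.counter; 'for c in ca' iterates ca's keys; Counter's cq[c] on a possibly
-- missing key returns 0, i.e. getD c 0.
def is_guess_valid_alt (answer : String) (query : String) (guess_code : Int) : Bool :=
  let r := PySem.Int.mod guess_code 3
  let n := min answer.toList.length query.toList.length
  let qn := query.toList.take n
  if r == 0 then !(qn.any (fun q => answer.toList.contains q))
  else if r == 2 then qn == answer.toList.take n
  else
    let ca := PySem.Dict.counter answer.toList
    let cq := PySem.Dict.counter qn
    ((qn.zip answer.toList).all (fun p => !(p.1 == p.2))) &&
      (ca.keys.all (fun c => cq.getD c 0 ≤ ca.getD c 0))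

-- ===== PRECONDITION & SPEC =====
def Spec_is_guess_valid (answer : String) (query : String) (guess_code : Int) (out : Bool) : Prop := out = is_guess_valid_alt answer query guess_code
instance (answer : String) (query : String) (guess_code : Int) (out : Bool) : Decidable (Spec_is_guess_valid answer query guess_code out) := by unfold Spec_is_guess_valid; infer_instance

-- ===== CLAIM (what is proved, stated in full; the proofs are below) =====
def Claim_equal_is_guess_valid : Prop := ∀ (answer : String) (query : String) (guess_code : Int), Dom_is_guess_valid answer query guess_code → Spec_is_guess_valid answer query guess_code (is_guess_valid answer query guess_code)

-- ===== LEMMAS AND PROOFS =====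

-- zipping with a prefix of the right length changes nothing
theorem zip_take_min (xs ys : List α) :
    (xs.take (min ys.length xs.length)).zip ys = xs.zip ys := by
  induction xs generalizing ys with
  | nil => simp
  | cons x xs ih =>
    cases ys with
    | nil => simp
    | cons y ys => simp [Nat.succ_min_succ, ih]

-- r = 0: A's loop is an any-scan over the zipped prefix, independent of the counter.
theorem loopA_r0 (ans : List Char) (gc : Int) (h : PySem.Int.mod gc 3 = 0) :
    ∀ (qs as : List Char) (counter : PySem.Dict Char Int),
      isGuessValidLoopA ans gc (qs.zip as) counter
        = !((qs.take (min as.length qs.length)).any (fun q => ans.contains q)) := by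
  intro qs
  induction qs with
  | nil => intro as counter; simp [isGuessValidLoopA]
  | cons q qs ih =>
    intro as counter
    cases as with
    | nil => simp [isGuessValidLoopA]
    | cons w as =>
      simp only [List.zip_cons_cons, isGuessValidLoopA, h]
      by_cases hq : q ∈ ans <;> simp [hq, ih, Nat.succ_min_succ]

-- r = 2: A's loop is a prefix comparison, independent of the counter.
theorem loopA_r2 (ans : List Char) (gc : Int) (h : PySem.Int.mod gc 3 = 2) :
    ∀ (qs as : List Char) (counter : PySem.Dict Char Int),
      isGuessValidLoopA ans gc (qs.zip as) counter
        = (qs.take (min as.length qs.length) == as.take (min as.length qs.length)) := by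
  intro qs
  induction qs with
  | nil => intro as counter; simp [isGuessValidLoopA]
  | cons q qs ih =>
    intro as counter
    cases as with
    | nil => simp [isGuessValidLoopA]
    | cons w as =>
      simp only [List.zip_cons_cons, isGuessValidLoopA, h]
      by_cases hqw : q = w
      · subst hqw
        simp [ih, Nat.succ_min_succ]
      · simp [hqw, Nat.succ_min_succ]

-- prefix counts are monotone in the prefix length
theorem count_take_mono (xs : List α) [BEq α] (c : α) {a b : Nat} (hab : a ≤ b) :
    (xs.take a).count c ≤ (xs.take b).count c := by
  have h1 : xs.take a = (xs.take b).take a := by rw [List.take_take, Nat.min_eq_left hab]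
  have h2 : (xs.take b).take a ++ (xs.take b).drop a = xs.take b := List.take_append_drop _ _
  calc (xs.take a).count c = ((xs.take b).take a).count c := by rw [h1]
    _ ≤ ((xs.take b).take a).count c + ((xs.take b).drop a).count c := Nat.le_add_right _ _
    _ = (xs.take b).count c := by rw [← List.count_append, h2]

-- r = 1: A's decremented counter at a key of the answer equals answer-count minus prefix-count;
-- provided no prefix count has yet reached its answer count, A's remaining loop is the
-- positional-inequality scan plus the whole-prefix multiset bound.
theorem loopA_r1 (ans query : List Char) (gc : Int) (h : PySem.Int.mod gc 3 = 1) :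
    ∀ (qs as : List Char) (i : Nat) (counter : PySem.Dict Char Int),
      qs = query.drop i →
      (∀ c, counter.contains c = ans.contains c) →
      (∀ c, c ∈ ans →
        counter.getD c 0 = (ans.count c : Int) - ((query.take i).count c : Int)) →
      (∀ c, c ∈ ans → (query.take i).count c ≤ ans.count c) →
      isGuessValidLoopA ans gc (qs.zip as) counter
        = (((qs.zip as).all (fun p => !(p.1 == p.2))) &&
           decide (∀ c, c ∈ ans →
             (query.take (i + min qs.length as.length)).count c ≤ ans.count c)) := by
  intro qs
  induction qs with
  | nil =>
    intro as i counter _ _ _ hbound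
    have hz : (List.zip ([] : List Char) as) = [] := rfl
    rw [hz]
    show true = (true && _)
    rw [Bool.true_and, eq_comm, decide_eq_true_eq]
    intro c hc
    simpa using hbound c hc
  | cons q qs ih =>
    intro as i counter hdrop hcont hval hbound
    cases as with
    | nil =>
      rw [List.zip_nil_right]
      show true = (true && _)
      rw [Bool.true_and, eq_comm, decide_eq_true_eq]
      intro c hc
      simpa using hbound c hc
    | cons w as =>
      have hqget : query[i]? = some q := by
        have : (query.drop i)[0]? = some q := by rw [← hdrop]; rfl
        simpa using this
      have htake : query.take (i + 1) = query.take i ++ [q] := by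
        rw [List.take_add_one, hqget]; rfl
      have hdrop' : qs = query.drop (i + 1) := by
        have h1 : query.drop (i + 1) = (query.drop i).drop 1 := by rw [List.drop_drop]
        rw [h1, ← hdrop]; rfl
      have hminsucc : min (q :: qs).length (w :: as).length = min qs.length as.length + 1 := by
        simp [Nat.succ_min_succ]
      simp only [List.zip_cons_cons, isGuessValidLoopA, h,
        show ((1:Int) == 0) = false from rfl, show ((1:Int) == 1) = true from rfl,
        show ((1:Int) == 2) = false from rfl, Bool.false_and, Bool.true_and, if_false,
        Bool.false_eq_true, hminsucc]
      by_cases hqw : q = w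
      · simp [hqw]
      · have hne : (q == w) = false := by simp [hqw]
        simp only [hne, Bool.false_or, Bool.not_false, Bool.true_and, Bool.false_eq_true,
          if_false]
        by_cases htrig : (counter.contains q && counter.getD q 0 == 0) = true
        · -- trigger: the prefix count of q has reached its answer count
          rw [Bool.and_eq_true] at htrig
          have hq : q ∈ ans := by
            have := htrig.1; rw [hcont] at this; simpa using this
          have heq : ans.count q = (query.take i).count q := by
            have h0 : ((ans.count q : Int) - ((query.take i).count q : Int) == 0) = true := by
              rw [← hval q hq]; exact htrig.2
            have h0' : (ans.count q : Int) - ((query.take i).count q : Int) = 0 := by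
              simpa using h0
            omega
          rw [if_pos (by simp [htrig.1, htrig.2])]
          have hfail : ¬ (∀ c, c ∈ ans →
              (query.take (i + (min qs.length as.length + 1))).count c ≤ ans.count c) := by
            intro hall
            have h1 : (query.take (i + 1)).count q ≤
                (query.take (i + (min qs.length as.length + 1))).count q :=
              count_take_mono query q (by omega)
            have h2 := hall q hq
            rw [htake, List.count_append] at h1
            simp only [List.count_singleton, BEq.rfl, if_pos] at h1
            omega
          simp only [decide_eq_false hfail, Bool.and_false]
        · -- no trigger: proceed; the prefix invariant is preserved
          rw [if_neg htrig]
          have hbound' : ∀ c, c ∈ ans → (query.take (i + 1)).count c ≤ ans.count c := by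
            intro c hc
            rw [htake, List.count_append]
            by_cases hcq : c = q
            · subst hcq
              have hcn : counter.contains c = true := by rw [hcont]; simpa using hc
              have hnz : counter.getD c 0 ≠ 0 := by
                intro h0
                exact htrig (by simp [hcn, h0])
              rw [hval c hc] at hnz
              have hb := hbound c hc
              have h1 : ([c].count c) = 1 := by simp
              rw [h1]
              omega
            · have h0 : ([q].count c) = 0 := by simp [Ne.symm hcq]
              rw [h0]
              simpa using hbound c hc
          have hrec : isGuessValidLoopA ans gc (qs.zip as)
              (if counter.contains q = true then counter.modify q 0 (· - 1) else counter)
              = (((qs.zip as).all (fun p => !(p.1 == p.2))) &&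
                 decide (∀ c, c ∈ ans →
                   (query.take ((i + 1) + min qs.length as.length)).count c ≤ ans.count c)) := by
            by_cases hq : q ∈ ans
            · have hcn : counter.contains q = true := by rw [hcont]; simpa using hq
              rw [if_pos hcn]
              refine ih as (i + 1) _ hdrop' ?_ ?_ hbound'
              · intro c
                rw [PySem.Dict.contains_modify, hcont]
                by_cases hcq : c = q
                · subst hcq; simp [hq]
                · simp [hcq]
              · intro c hcin
                rw [PySem.Dict.getD_modify]
                by_cases hcq : c = q
                · subst hcq
                  rw [if_pos rfl, hval c hcin, htake]
                  simp
                  ring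
                · rw [if_neg hcq, hval c hcin, htake]
                  have h0 : ([q].count c) = 0 := by simp [Ne.symm hcq]
                  simp [List.count_append, h0]
            · have hcn : counter.contains q = false := by rw [hcont]; simpa using hq
              rw [if_neg (by simp [hcn])]
              refine ih as (i + 1) counter hdrop' hcont ?_ hbound'
              intro c hcin
              rw [hval c hcin, htake]
              have hcq : c ≠ q := fun he => hq (he ▸ hcin)
              have h0 : ([q].count c) = 0 := by simp [Ne.symm hcq]
              simp [List.count_append, h0]
          rw [hrec]
          have harith : (i + 1) + min qs.length as.length
              = i + (min qs.length as.length + 1) := by omega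
          rw [harith]
          simp [hne]

-- ===== VERDICT (by name: the statement is the Claim_ definition above) =====
theorem is_guess_valid_spec : Claim_equal_is_guess_valid := by
  intro answer query guess_code _
  unfold Spec_is_guess_valid is_guess_valid is_guess_valid_alt
  have h0 : (0:Int) ≤ PySem.Int.mod guess_code 3 := PySem.Int.mod_nonneg guess_code (by norm_num)
  have h3 : PySem.Int.mod guess_code 3 < 3 := PySem.Int.mod_lt guess_code (by norm_num)
  have hc : PySem.Int.mod guess_code 3 = 0 ∨ PySem.Int.mod guess_code 3 = 1 ∨
      PySem.Int.mod guess_code 3 = 2 := by omega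
  rcases hc with h | h | h
  · rw [loopA_r0 answer.toList guess_code h, h]
    simp [Nat.min_comm]
  · rw [loopA_r1 answer.toList query.toList guess_code h query.toList answer.toList 0
      (PySem.Dict.counter answer.toList) rfl
      (fun c => PySem.Dict.contains_counter answer.toList c)
      (fun c _ => by simp [PySem.Dict.getD_counter])
      (fun c _ => by simp), h]
    have hzip : (query.toList.take
          (min answer.toList.length query.toList.length)).zip answer.toList
        = query.toList.zip answer.toList := zip_take_min _ _
    have hkeys : ((PySem.Dict.counter answer.toList).keys.all
          (fun c => (PySem.Dict.counter
              (query.toList.take (min answer.toList.length query.toList.length))).getD c 0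
            ≤ (PySem.Dict.counter answer.toList).getD c 0))
        = decide (∀ c, c ∈ answer.toList →
            (query.toList.take (0 + min query.toList.length answer.toList.length)).count c
              ≤ answer.toList.count c) := by
      rw [PySem.Dict.keys_counter]
      simp only [List.all_eq_true, PySem.Dict.getD_counter, Nat.zero_add, Nat.min_comm,
        decide_eq_true_eq]
      rw [Bool.eq_iff_iff]
      constructor
      · intro hall
        rw [decide_eq_true_eq]
        intro c hmem
        rw [List.all_eq_true] at hall
        have := hall c (by rw [PySem.Set.mem_ofList]; exact hmem)
        simpa using this
      · intro hall
        rw [decide_eq_true_eq] at hall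
        rw [List.all_eq_true]
        intro c hmem
        rw [PySem.Set.mem_ofList] at hmem
        simpa using hall c hmem
    simp only [show ((1:Int) == 0) = false from rfl, show ((1:Int) == 2) = false from rfl,
      Bool.false_eq_true, if_false, hzip, hkeys]
  · rw [loopA_r2 answer.toList guess_code h, h]
    simp [Nat.min_comm]
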